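-- pv_equiv track=rewrite | github.com/Eve0028/theft-detector | ssvep/ssvep_analysis.py | get_smoothed_selection
-- ===== SOURCE A (Python) =====
-- from typing import List, Optional, Tuple
--
-- def get_smoothed_selection(
--     history: List[int],
--     min_agreements: int = 2,
--     n_classes: Optional[int] = None,
-- ) -> Optional[int]:
--     """
--     Require `min_agreements` same consecutive results before returning class index.
--     Supports 2 classes (0, 1) or N classes (0..N-1); use n_classes to allow 0..n_classes-1.
--     Returns None if not enough agreement (no feedback).
--     """
--     if len(history) < min_agreements:
--         return None
--     recent = history[-min_agreements:]
--     if n_classes is None: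
--         n_classes = 2
--     for c in range(n_classes):
--         if all(x == c for x in recent):
--             return c
--     return None
-- ===== SOURCE B (Python) =====
-- from typing import List, Optional
--
-- def get_smoothed_selection(
--     history: List[int],
--     min_agreements: int = 2,
--     n_classes: Optional[int] = None,
-- ) -> Optional[int]:
--     if len(history) < min_agreements:
--         return None
--     n = 2 if n_classes is None else n_classes
--     recent = history[-min_agreements:]
--     if recent and 0 <= recent[0] < n and all(x == recent[0] for x in recent):
--         return recent[0]
--     return None
-- ===== Notes on version B (the rewrite author's own statement) =====
-- stated objective: simpler
-- what changed: Replaces the scan over every candidate class 0..n_classes-1 with a single equality-against-first-element check plus a range test, removing the class loop entirely.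
-- intended difference: When min_agreements is at most minus the length of history the agreement window is empty; if at least one class exists A returns class 0 because an all() test over an empty window is vacuously true although nothing agreed, while B returns None, the intended no-agreement answer. — e.g. on get_smoothed_selection([], 0, none): A returns some 0, B returns none
import Mathlib
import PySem

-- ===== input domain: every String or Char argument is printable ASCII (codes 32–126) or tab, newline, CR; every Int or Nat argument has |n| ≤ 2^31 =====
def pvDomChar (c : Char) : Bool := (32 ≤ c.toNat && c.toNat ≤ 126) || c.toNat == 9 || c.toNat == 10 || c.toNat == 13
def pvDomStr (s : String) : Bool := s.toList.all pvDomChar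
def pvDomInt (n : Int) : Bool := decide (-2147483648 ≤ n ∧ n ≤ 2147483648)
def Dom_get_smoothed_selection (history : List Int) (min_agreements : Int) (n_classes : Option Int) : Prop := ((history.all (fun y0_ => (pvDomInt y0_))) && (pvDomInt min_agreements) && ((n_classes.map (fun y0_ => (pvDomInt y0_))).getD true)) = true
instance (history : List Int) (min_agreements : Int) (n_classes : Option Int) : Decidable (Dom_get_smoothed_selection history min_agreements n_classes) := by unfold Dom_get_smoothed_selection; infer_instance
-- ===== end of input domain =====

-- B: one equality-against-first-element check instead of a loop over every candidate class (simpler).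
-- ===== PORT A =====
-- 'for c in range(n_classes): if all(x == c for x in recent): return c' / 'return None'
-- (the for-loop over range(n) with early return, as a counter recursion: c runs 0,1,…; fuel = iterations left)
def pvFindClassA (recent : List Int) (c : Int) : Nat → Option Int
  | 0 => none
  | fuel + 1 => if recent.all (fun x => x == c) then some c else pvFindClassA recent (c + 1) fuel

def get_smoothed_selection (history : List Int) (min_agreements : Int) (n_classes : Option Int) : Option Int :=
  if (history.length : Int) < min_agreements then none
  else
    let recent := PySem.List.slice history (some (-min_agreements)) none
    let n := n_classes.getD 2
    pvFindClassA recent 0 n.toNat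

-- ===== PORT B =====
def get_smoothed_selection_alt (history : List Int) (min_agreements : Int) (n_classes : Option Int) : Option Int :=
  if (history.length : Int) < min_agreements then none
  else
    let n := n_classes.getD 2
    let recent := PySem.List.slice history (some (-min_agreements)) none
    match recent with
    | [] => none
    | v :: rest =>
        if 0 ≤ v ∧ v < n ∧ (v :: rest).all (fun x => x == v) then some v else none

-- ===== PRECONDITION & SPEC =====
-- When the agreement window is empty (min_agreements ≤ -len(history)) and at least one class exists,
-- A returns class 0 because all() over an empty window is vacuously true, although nothing agreed;
-- B returns None, the intended 'not enough agreement' answer.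
def D_get_smoothed_selection (history : List Int) (min_agreements : Int) (n_classes : Option Int) : Prop :=
  (history.length : Int) + min_agreements ≤ 0 ∧ 1 ≤ n_classes.getD 2
instance (history : List Int) (min_agreements : Int) (n_classes : Option Int) : Decidable (D_get_smoothed_selection history min_agreements n_classes) := by unfold D_get_smoothed_selection; infer_instance

def Spec_get_smoothed_selection (history : List Int) (min_agreements : Int) (n_classes : Option Int) (out : Option Int) : Prop := ¬ D_get_smoothed_selection history min_agreements n_classes → out = get_smoothed_selection_alt history min_agreements n_classes
instance (history : List Int) (min_agreements : Int) (n_classes : Option Int) (out : Option Int) : Decidable (Spec_get_smoothed_selection history min_agreements n_classes out) := by unfold Spec_get_smoothed_selection; infer_instance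

def pvDiffWitness_get_smoothed_selection : List Int × Int × Option Int := ([], 0, none)
def pvDiffWitnessOut_get_smoothed_selection : (Option Int) × (Option Int) := (some 0, none)

-- ===== CLAIM (what is proved, stated in full; the proofs are below) =====
def Claim_unchanged_get_smoothed_selection : Prop := ∀ (history : List Int) (min_agreements : Int) (n_classes : Option Int), Dom_get_smoothed_selection history min_agreements n_classes → Spec_get_smoothed_selection history min_agreements n_classes (get_smoothed_selection history min_agreements n_classes)
def Claim_changed_get_smoothed_selection : Prop := Dom_get_smoothed_selection (pvDiffWitness_get_smoothed_selection.1) (pvDiffWitness_get_smoothed_selection.2.1) (pvDiffWitness_get_smoothed_selection.2.2) ∧ D_get_smoothed_selection (pvDiffWitness_get_smoothed_selection.1) (pvDiffWitness_get_smoothed_selection.2.1) (pvDiffWitness_get_smoothed_selection.2.2) ∧ get_smoothed_selection (pvDiffWitness_get_smoothed_selection.1) (pvDiffWitness_get_smoothed_selection.2.1) (pvDiffWitness_get_smoothed_selection.2.2) = pvDiffWitnessOut_get_smoothed_selection.1 ∧ get_smoothed_selection_alt (pvDiffWitness_get_smoothed_selection.1) (pvDiffWitness_get_smoothed_selection.2.1)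 (pvDiffWitness_get_smoothed_selection.2.2) = pvDiffWitnessOut_get_smoothed_selection.2 ∧ pvDiffWitnessOut_get_smoothed_selection.1 ≠ pvDiffWitnessOut_get_smoothed_selection.2
def Claim_exact_get_smoothed_selection : Prop := ∀ (history : List Int) (min_agreements : Int) (n_classes : Option Int), Dom_get_smoothed_selection history min_agreements n_classes → D_get_smoothed_selection history min_agreements n_classes → get_smoothed_selection history min_agreements n_classes ≠ get_smoothed_selection_alt history min_agreements n_classes

-- ===== LEMMAS AND PROOFS =====
theorem pvFindClassA_nil (c : Int) (fuel : Nat) :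
    pvFindClassA [] c fuel = if fuel = 0 then none else some c := by
  cases fuel <;> simp [pvFindClassA]

theorem pvFindClassA_cons (v : Int) (rest : List Int) (c : Int) (fuel : Nat) :
    pvFindClassA (v :: rest) c fuel =
      if rest.all (fun x => x == v) ∧ c ≤ v ∧ v < c + fuel then some v else none := by
  induction fuel generalizing c with
  | zero =>
    symm
    rw [pvFindClassA, if_neg]
    rintro ⟨-, h1, h2⟩
    push_cast at h2
    omega
  | succ fuel ih =>
    simp only [pvFindClassA, ih, List.all_cons, Bool.and_eq_true, beq_iff_eq]
    push_cast
    rcases eq_or_ne v c with he | he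
    · subst he
      by_cases hr : rest.all (fun x => x == v)
      · rw [if_pos ⟨rfl, hr⟩, if_pos ⟨hr, le_refl v, by omega⟩]
      · rw [if_neg (fun h => hr h.2), if_neg (fun h => hr h.1), if_neg (fun h => hr h.1)]
    · rw [if_neg (fun h => he h.1)]
      by_cases hr : rest.all (fun x => x == v)
      · exact if_congr (by constructor <;> rintro ⟨h', ha, hb⟩ <;> exact ⟨h', by omega, by omega⟩) rfl rfl
      · rw [if_neg (fun h => hr h.1), if_neg (fun h => hr h.1)]

-- if the window history[-m:] is empty although len(history) ≥ m, then len(history) + m ≤ 0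
theorem pv_slice_nil_le (history : List Int) (m : Int)
    (hlen : ¬ (history.length : Int) < m)
    (hrec : PySem.List.slice history (some (-m)) none = []) :
    (history.length : Int) + m ≤ 0 := by
  by_cases hm : 0 < m
  · exfalso
    have hm' : (-m) = -((m.toNat : Nat) : Int) := by omega
    rw [hm', PySem.List.slice_from_neg_natCast _ _ (by omega)] at hrec
    have := List.drop_eq_nil_iff.mp hrec
    omega
  · rw [PySem.List.slice_from] at hrec
    · have := List.drop_eq_nil_iff.mp hrec
      omega
    · omega

-- ===== VERDICT (by name: the statement is the Claim_ definition above) =====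
theorem get_smoothed_selection_spec : Claim_unchanged_get_smoothed_selection := by
  intro history m n? _
  unfold Spec_get_smoothed_selection
  intro hnD
  unfold get_smoothed_selection get_smoothed_selection_alt
  by_cases hlen : (history.length : Int) < m
  · simp [hlen]
  · simp only [hlen, if_false]
    cases hrec : PySem.List.slice history (some (-m)) none with
    | nil =>
      rw [pvFindClassA_nil]
      have hle := pv_slice_nil_le history m hlen hrec
      unfold D_get_smoothed_selection at hnD
      push Not at hnD
      have hn : n?.getD 2 < 1 := hnD hle
      have h0 : (n?.getD 2).toNat = 0 := by omega
      simp [h0]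
    | cons v rest =>
      rw [pvFindClassA_cons]
      by_cases hr : rest.all (fun x => x == v)
      · simp only [hr, true_and, List.all_cons, beq_self_eq_true, Bool.true_and, zero_add, and_true]
        split_ifs with h1 h2 h2 <;> first | rfl | (exfalso; omega)
      · simp [hr, List.all_cons]

theorem get_smoothed_selection_changed : Claim_changed_get_smoothed_selection := by
  unfold Claim_changed_get_smoothed_selection; decide

theorem get_smoothed_selection_tight : Claim_exact_get_smoothed_selection := by
  intro history m n? _ hD
  obtain ⟨hle, hn⟩ := hD
  have hlen : ¬ (history.length : Int) < m := by omega
  unfold get_smoothed_selection get_smoothed_selection_alt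
  simp only [hlen, if_false]
  have hrec : PySem.List.slice history (some (-m)) none = [] := by
    rw [PySem.List.slice_from]
    · exact List.drop_eq_nil_iff.mpr (by omega)
    · omega
  rw [hrec, pvFindClassA_nil, if_neg (by omega)]
  simp
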